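-- pv_equiv track=rewrite | github.com/Jourdelune/photogrammetry_ai | src/photogrammetry_ai/pipeline/graph.py | convert_to_binary_tree
-- ===== SOURCE A (Python) =====
-- from collections import defaultdict
-- from typing import Dict, List, Set, Any
--
-- def convert_to_binary_tree(
--     graph: Dict[Any, List[Any]], root: Any
-- ) -> Dict[Any, List[Any]]:
--     """
--     Convert a general graph to a binary tree starting from the given root.
--
--     Args:
--         graph (Dict[Any, List[Any]]): The input graph represented as an adjacency list.
--         root (Any): The root node to start the conversion.
--
--     Returns:
--         Dict[Any, List[Any]]: The resulting binary tree as an adjacency list.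
--     """
--     binary_tree: Dict[Any, List[Any]] = defaultdict(list)
--     visited: Set[Any] = set()
--
--     def dfs(current: Any) -> None:
--         visited.add(current)
--         children = [n for n in graph[current] if n not in visited]
--
--         if not children:
--             return
--
--         leftmost = children[0]
--         binary_tree[current].append(leftmost)
--         dfs(leftmost)
--
--         # Siblings become right child chain
--         prev = leftmost
--         for sibling in children[1:]:
--             binary_tree[prev].append(sibling)
--             dfs(sibling)
--             prev = sibling
--
--     dfs(root)
--     return binary_tree
-- ===== SOURCE B (Python) =====
-- from collections import defaultdict
-- from typing import Dict, List, Any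
--
--
-- def convert_to_binary_tree(
--     graph: Dict[Any, List[Any]], root: Any
-- ) -> Dict[Any, List[Any]]:
--     """Iterative left-child/right-sibling conversion using an explicit agenda stack."""
--     binary_tree: Dict[Any, List[Any]] = defaultdict(list)
--     visited = set()
--     stack = [("visit", None, root)]
--     while stack:
--         kind, prev, node = stack.pop()
--         if kind == "edge":
--             binary_tree[prev].append(node)
--             continue
--         visited.add(node)
--         children = [n for n in graph[node] if n not in visited]
--         if children:
--             binary_tree[node].append(children[0])
--             tasks = [("visit", None, children[0])]
--             for p, s in zip(children, children[1:]):
--                 tasks.append(("edge", p, s))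
--                 tasks.append(("visit", None, s))
--             stack.extend(reversed(tasks))
--     return binary_tree
-- ===== Notes on version B (the rewrite author's own statement) =====
-- stated objective: alternative
-- what changed: Replaces the recursive DFS (nested function mutating closure state, with a separate sibling loop) by a single iterative loop over an explicit agenda stack of visit/edge tasks, pushed in reverse so the pop order reproduces the recursion's emission order exactly.
import Mathlib
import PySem

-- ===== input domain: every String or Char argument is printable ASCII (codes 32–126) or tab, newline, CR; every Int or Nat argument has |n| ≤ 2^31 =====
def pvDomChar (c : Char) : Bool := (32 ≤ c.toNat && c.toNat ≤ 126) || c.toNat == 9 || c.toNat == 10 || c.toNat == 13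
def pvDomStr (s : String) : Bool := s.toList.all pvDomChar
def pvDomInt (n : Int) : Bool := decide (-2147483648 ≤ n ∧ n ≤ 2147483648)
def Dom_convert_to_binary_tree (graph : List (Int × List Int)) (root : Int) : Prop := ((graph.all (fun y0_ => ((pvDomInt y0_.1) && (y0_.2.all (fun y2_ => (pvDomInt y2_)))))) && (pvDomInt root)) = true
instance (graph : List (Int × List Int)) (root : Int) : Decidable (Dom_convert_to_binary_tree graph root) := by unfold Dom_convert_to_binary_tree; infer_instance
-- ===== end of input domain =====

-- B changes the decomposition only: one iterative loop over an explicit visit/edge task stack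
-- instead of A's recursive DFS with a separate sibling loop; same values, same cost.

-- ===== PORT A =====
-- shared state: (binary_tree as insertion-ordered dict, visited set);
-- binary_tree[p].append(c) on a defaultdict(list):
def pvEmit (bt : PySem.Dict Int (List Int)) (p c : Int) : PySem.Dict Int (List Int) :=
  bt.insert p (bt.getD p [] ++ [c])

-- graph[x] (none = KeyError, excluded by Pre_)
def pvLook (graph : List (Int × List Int)) (x : Int) : Option (List Int) :=
  PySem.Dict.get? (PySem.Dict.mk graph) x

-- fuel bound for the (Python-terminating) recursion: 2·|reachable| + 3, where the
-- reachable set is computed as an iterated closure (used only as a totality guard).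
def pvU (graph : List (Int × List Int)) (root : Int) : List Int :=
  root :: graph.flatMap (fun p => p.1 :: p.2)

def pvStep (graph : List (Int × List Int)) (s : PySem.Set Int) : PySem.Set Int :=
  s.foldl (fun acc x =>
    match pvLook graph x with
    | some adj => PySem.Set.update acc adj
    | none => acc) s

def pvIter (graph : List (Int × List Int)) : Nat → PySem.Set Int → PySem.Set Int
  | 0, s => s
  | k + 1, s => if pvStep graph s = s then s else pvIter graph k (pvStep graph s)

def pvReach (graph : List (Int × List Int)) (root : Int) : PySem.Set Int :=
  pvIter graph (pvU graph root).length (PySem.Set.ofList [root])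

def pvFuelA (graph : List (Int × List Int)) (root : Int) : Nat :=
  2 * (pvReach graph root).length + 3

-- the recursive dfs of A (fuel is only a totality guard; proven sufficient under Pre_)
mutual
def pvDfsA (graph : List (Int × List Int)) :
    Nat → Int → (PySem.Dict Int (List Int) × PySem.Set Int) →
    Option (PySem.Dict Int (List Int) × PySem.Set Int)
  | 0, _, _ => none
  | f + 1, current, (bt, vis) =>
    let vis' := PySem.Set.add vis current
    match pvLook graph current with
    | none => none            -- KeyError
    | some adj =>
      match adj.filter (fun n => !(PySem.Set.contains vis' n)) with
      | [] => some (bt, vis')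
      | leftmost :: rest =>
        match pvDfsA graph f leftmost (pvEmit bt current leftmost, vis') with
        | none => none
        | some st => pvSibA graph f leftmost rest st
  termination_by f _ _ => (f, 0)

-- the "siblings become right child chain" loop of A
def pvSibA (graph : List (Int × List Int)) :
    Nat → Int → List Int → (PySem.Dict Int (List Int) × PySem.Set Int) →
    Option (PySem.Dict Int (List Int) × PySem.Set Int)
  | _, _, [], st => some st
  | f, prev, s :: ss, (bt, vis) =>
    match pvDfsA graph f s (pvEmit bt prev s, vis) with
    | none => none
    | some st => pvSibA graph f s ss st
  termination_by f _ ss _ => (f, ss.length + 1)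
end

def convert_to_binary_tree (graph : List (Int × List Int)) (root : Int) : List (Int × List Int) :=
  match pvDfsA graph (pvFuelA graph root) root (PySem.Dict.mk [], PySem.Set.empty) with
  | some (bt, _) => bt.items
  | none => []

-- ===== PORT B =====
-- agenda tasks: visit a node, or emit one edge prev→node
inductive PvTask where
  | visit : Int → PvTask
  | edge : Int → Int → PvTask
deriving DecidableEq, Repr

-- the tasks appended for the sibling chain (in pop order)
def pvChain : Int → List Int → List PvTask
  | _, [] => []
  | p, s :: ss => .edge p s :: .visit s :: pvChain s ss

-- K+1 with K = max adjacency-list length (fuel base, only a totality guard)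
def pvK (graph : List (Int × List Int)) : Nat :=
  graph.foldl (fun m p => max m p.2.length) 0 + 1

def pvFuelB (graph : List (Int × List Int)) (root : Int) : Nat :=
  (pvK graph + 1) ^ pvFuelA graph root

-- the while-loop of B; the list is the stack in pop order (head = top);
-- stack.extend(reversed(tasks)) = prepending tasks in order
def pvRunB (graph : List (Int × List Int)) :
    Nat → List PvTask → (PySem.Dict Int (List Int) × PySem.Set Int) →
    Option (PySem.Dict Int (List Int) × PySem.Set Int)
  | _, [], st => some st
  | f, .edge p c :: rest, (bt, vis) => pvRunB graph f rest (pvEmit bt p c, vis)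
  | 0, .visit _ :: _, _ => none
  | f + 1, .visit node :: rest, (bt, vis) =>
    let vis' := PySem.Set.add vis node
    match pvLook graph node with
    | none => none            -- KeyError
    | some adj =>
      match adj.filter (fun n => !(PySem.Set.contains vis' n)) with
      | [] => pvRunB graph f rest (bt, vis')
      | c0 :: cs => pvRunB graph f (.visit c0 :: (pvChain c0 cs ++ rest)) (pvEmit bt node c0, vis')
  termination_by f stk _ => (f, stk.length)

def convert_to_binary_tree_alt (graph : List (Int × List Int)) (root : Int) : List (Int × List Int) :=
  match pvRunB graph (pvFuelB graph root) [.visit root] (PySem.Dict.mk [], PySem.Set.empty) with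
  | some (bt, _) => bt.items
  | none => []

-- ===== PRECONDITION & SPEC =====
-- Pre_ excludes exactly the inputs on which A raises KeyError: some node reachable from
-- the root (through keyed nodes) has no adjacency entry in graph.
def Pre_convert_to_binary_tree (graph : List (Int × List Int)) (root : Int) : Prop :=
  ∀ x ∈ pvReach graph root, (pvLook graph x).isSome = true

instance (graph : List (Int × List Int)) (root : Int) : Decidable (Pre_convert_to_binary_tree graph root) := by
  unfold Pre_convert_to_binary_tree; infer_instance

def pvWitness_convert_to_binary_tree : (List (Int × List Int)) × Int := ([(0, [1, 2]), (1, [2]), (2, [])], 0)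

def Spec_convert_to_binary_tree (graph : List (Int × List Int)) (root : Int) (out : List (Int × List Int)) : Prop := out = convert_to_binary_tree_alt graph root
instance (graph : List (Int × List Int)) (root : Int) (out : List (Int × List Int)) : Decidable (Spec_convert_to_binary_tree graph root out) := by unfold Spec_convert_to_binary_tree; infer_instance

-- ===== CLAIM (what is proved, stated in full; the proofs are below) =====
def Claim_equal_convert_to_binary_tree : Prop := ∀ (graph : List (Int × List Int)) (root : Int), Dom_convert_to_binary_tree graph root → Pre_convert_to_binary_tree graph root → Spec_convert_to_binary_tree graph root (convert_to_binary_tree graph root)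


-- ===== LEMMAS AND PROOFS =====

theorem pv_mem_foldl_update (graph : List (Int × List Int)) :
    ∀ (l : List Int) (acc : PySem.Set Int) (y : Int),
      y ∈ l.foldl (fun acc x =>
        match pvLook graph x with
        | some adj => PySem.Set.update acc adj
        | none => acc) acc ↔
      y ∈ acc ∨ ∃ x ∈ l, ∃ adj, pvLook graph x = some adj ∧ y ∈ adj := by
  intro l
  induction l with
  | nil => simp
  | cons a l ih =>
    intro acc y
    simp only [List.foldl_cons, ih]
    cases hl : pvLook graph a with
    | none =>
      simp only [hl]
      constructor
      · rintro (h | ⟨x, hx, adj', ha, hy⟩)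
        · tauto
        · exact Or.inr ⟨x, by simp [hx], adj', ha, hy⟩
      · rintro (h | ⟨x, hx, adj', ha, hy⟩)
        · tauto
        · rcases List.mem_cons.mp hx with rfl | hx
          · rw [hl] at ha; cases ha
          · exact Or.inr ⟨x, hx, adj', ha, hy⟩
    | some adj =>
      simp only [hl, PySem.Set.mem_update]
      constructor
      · rintro (⟨h | h⟩ | ⟨x, hx, adj', ha, hy⟩)
        · tauto
        · exact Or.inr ⟨a, by simp, adj, hl, h⟩
        · exact Or.inr ⟨x, by simp [hx], adj', ha, hy⟩
      · rintro (h | ⟨x, hx, adj', ha, hy⟩)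
        · tauto
        · rcases List.mem_cons.mp hx with rfl | hx
          · rw [hl] at ha; cases ha; tauto
          · exact Or.inr ⟨x, hx, adj', ha, hy⟩

theorem pv_mem_step (graph : List (Int × List Int)) (s : PySem.Set Int) (y : Int) :
    y ∈ pvStep graph s ↔ y ∈ s ∨ ∃ x ∈ s, ∃ adj, pvLook graph x = some adj ∧ y ∈ adj :=
  pv_mem_foldl_update graph s s y

theorem pv_nodup_step (graph : List (Int × List Int)) (s : PySem.Set Int) (hs : s.Nodup) :
    (pvStep graph s).Nodup := by
  have gen : ∀ (l : List Int) (acc : PySem.Set Int), acc.Nodup →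
      (l.foldl (fun acc x =>
        match pvLook graph x with
        | some adj => PySem.Set.update acc adj
        | none => acc) acc).Nodup := by
    intro l
    induction l with
    | nil => intro acc h; exact h
    | cons a l ih =>
      intro acc h
      simp only [List.foldl_cons]
      apply ih
      cases hl : pvLook graph a with
      | none => simpa [hl] using h
      | some adj => simp only [hl]; exact PySem.Set.nodup_update acc adj h
  exact gen s s hs

theorem pv_add_append (s : PySem.Set Int) (x : Int) :
    ∃ t, PySem.Set.add s x = s ++ t ∧ ∀ y ∈ t, y ∉ s := by
  rw [PySem.Set.add_eq_ite]
  by_cases hx : x ∈ s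
  · exact ⟨[], by simp [hx]⟩
  · refine ⟨[x], by simp [hx], ?_⟩
    intro y hy
    rcases List.mem_singleton.mp hy with rfl
    exact hx

theorem pv_update_append (l : List Int) : ∀ (s : PySem.Set Int),
    ∃ t, PySem.Set.update s l = s ++ t ∧ ∀ y ∈ t, y ∉ s := by
  induction l with
  | nil => intro s; exact ⟨[], by simp [PySem.Set.update], by simp⟩
  | cons a l ih =>
    intro s
    obtain ⟨t1, h1, hn1⟩ := pv_add_append s a
    obtain ⟨t2, h2, hn2⟩ := ih (PySem.Set.add s a)
    refine ⟨t1 ++ t2, ?_, ?_⟩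
    · show PySem.Set.update (PySem.Set.add s a) l = s ++ (t1 ++ t2)
      rw [h2, h1, List.append_assoc]
    · intro y hy
      rcases List.mem_append.mp hy with hy | hy
      · exact hn1 y hy
      · intro hys
        exact hn2 y hy (by rw [h1]; exact List.mem_append.mpr (Or.inl hys))

theorem pv_step_append (graph : List (Int × List Int)) (s : PySem.Set Int) :
    ∃ t, pvStep graph s = s ++ t ∧ ∀ y ∈ t, y ∉ s := by
  have gen : ∀ (l : List Int) (acc : PySem.Set Int),
      ∃ t, (l.foldl (fun acc x =>
        match pvLook graph x with
        | some adj => PySem.Set.update acc adj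
        | none => acc) acc) = acc ++ t ∧ ∀ y ∈ t, y ∉ acc := by
    intro l
    induction l with
    | nil => intro acc; exact ⟨[], by simp⟩
    | cons a l ih =>
      intro acc
      cases hl : pvLook graph a with
      | none =>
        obtain ⟨t, ht, hn⟩ := ih acc
        exact ⟨t, by simp only [List.foldl_cons, hl]; exact ht, hn⟩
      | some adj =>
        obtain ⟨t1, h1, hn1⟩ := pv_update_append adj acc
        obtain ⟨t2, h2, hn2⟩ := ih (PySem.Set.update acc adj)
        refine ⟨t1 ++ t2, ?_, ?_⟩
        · simp only [List.foldl_cons, hl]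
          rw [h2, h1, List.append_assoc]
        · intro y hy
          rcases List.mem_append.mp hy with hy | hy
          · exact hn1 y hy
          · intro hys
            exact hn2 y hy (by rw [h1]; exact List.mem_append.mpr (Or.inl hys))
  exact gen s s

theorem pv_iter_fix (graph : List (Int × List Int)) (k : Nat) (s : PySem.Set Int)
    (h : pvStep graph s = s) : pvIter graph k s = s := by
  cases k with
  | zero => rfl
  | succ k => rw [pvIter, if_pos h]

theorem pv_adj_sub_U (graph : List (Int × List Int)) (root : Int) (x : Int) (adj : List Int)
    (h : pvLook graph x = some adj) : ∀ y ∈ adj, y ∈ pvU graph root := by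
  intro y hy
  unfold pvLook PySem.Dict.get? at h
  cases hf : List.find? (fun p => p.1 == x) (PySem.Dict.mk graph).items with
  | none => rw [hf] at h; cases h
  | some p =>
    rw [hf] at h
    simp only [Option.map_some] at h
    have hp : p ∈ graph := List.mem_of_find?_eq_some hf
    have : y ∈ graph.flatMap (fun p => p.1 :: p.2) := by
      apply List.mem_flatMap.mpr
      have h2 : p.2 = adj := Option.some.inj h
      exact ⟨p, hp, by rw [h2]; exact List.mem_cons_of_mem _ hy⟩
    exact List.mem_cons_of_mem _ this

theorem pv_iter_closed (graph : List (Int × List Int)) (root : Int) :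
    ∀ (k : Nat) (s : PySem.Set Int), s.Nodup → (∀ x ∈ s, x ∈ pvU graph root) →
      (PySem.Set.ofList (pvU graph root)).length ≤ s.length + k →
      (∀ y, y ∈ pvStep graph (pvIter graph k s) → y ∈ pvIter graph k s) ∧
      (∀ x ∈ s, x ∈ pvIter graph k s) := by
  intro k
  induction k with
  | zero =>
    intro s hnd hsub hlen
    have hsub' : s ⊆ PySem.Set.ofList (pvU graph root) := by
      intro x hx
      exact (PySem.Set.mem_ofList _ _).mpr (hsub x hx)
    have hsp : s.Subperm (PySem.Set.ofList (pvU graph root)) := hnd.subperm hsub'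
    have hperm : s.Perm (PySem.Set.ofList (pvU graph root)) :=
      hsp.perm_of_length_le (by simpa using hlen)
    have hUs : ∀ x, x ∈ pvU graph root → x ∈ s := by
      intro x hx
      exact hperm.mem_iff.mpr ((PySem.Set.mem_ofList _ _).mpr hx)
    constructor
    · intro y hy
      rcases (pv_mem_step graph s y).mp hy with hy | ⟨x, hx, adj, ha, hya⟩
      · exact hy
      · exact hUs y (pv_adj_sub_U graph root x adj ha y hya)
    · intro x hx; exact hx
  | succ k ih =>
    intro s hnd hsub hlen
    by_cases hc : pvStep graph s = s
    · have hit : pvIter graph (k+1) s = s := pv_iter_fix graph (k+1) s hc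
      rw [hit]
      exact ⟨fun y hy => by rw [hc] at hy; exact hy, fun x hx => hx⟩
    · obtain ⟨t, ht, htn⟩ := pv_step_append graph s
      have htne : t ≠ [] := by
        intro h0
        exact hc (by rw [ht, h0, List.append_nil])
      obtain ⟨y₀, t', rfl⟩ := List.exists_cons_of_ne_nil htne
      have hy₀s : y₀ ∈ pvStep graph s := by
        rw [ht]; exact List.mem_append.mpr (Or.inr List.mem_cons_self)
      have hy₀n : y₀ ∉ s := htn y₀ List.mem_cons_self
      have hss : ∀ x ∈ s, x ∈ pvStep graph s := by
        intro x hx; exact (pv_mem_step graph s x).mpr (Or.inl hx)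
      have hnds : (pvStep graph s).Nodup := pv_nodup_step graph s hnd
      have hsubs : ∀ x ∈ pvStep graph s, x ∈ pvU graph root := by
        intro x hx
        rcases (pv_mem_step graph s x).mp hx with hx | ⟨z, hz, adj, ha, hxa⟩
        · exact hsub x hx
        · exact pv_adj_sub_U graph root z adj ha x hxa
      have hlen' : s.length + 1 ≤ (pvStep graph s).length := by
        have hnd2 : (s ++ [y₀]).Nodup := by
          rw [List.nodup_append]
          refine ⟨hnd, List.nodup_singleton _, ?_⟩
          intro a ha b hb
          rcases List.mem_singleton.mp hb with rfl
          intro heq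
          exact hy₀n (heq ▸ ha)
        have hsub2 : (s ++ [y₀]) ⊆ pvStep graph s := by
          intro x hx
          rcases List.mem_append.mp hx with hx | hx
          · exact hss x hx
          · simp at hx; subst hx; exact hy₀s
        have := (hnd2.subperm hsub2).length_le
        simpa using this
      have ihr := ih (pvStep graph s) hnds hsubs (by omega)
      have heq : pvIter graph (k+1) s = pvIter graph k (pvStep graph s) := by
        rw [pvIter, if_neg hc]
      rw [heq]
      exact ⟨ihr.1, fun x hx => ihr.2 x (hss x hx)⟩

theorem pv_reach_closed (graph : List (Int × List Int)) (root : Int) :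
    ∀ y, y ∈ pvStep graph (pvReach graph root) → y ∈ pvReach graph root := by
  have h := pv_iter_closed graph root (pvU graph root).length (PySem.Set.ofList [root])
    (PySem.Set.nodup_ofList _)
    (by intro x hx; simp [PySem.Set.mem_ofList] at hx; subst hx; exact List.mem_cons_self)
    (by
      have h1 := PySem.Set.length_ofList_le (pvU graph root)
      have h2 : (PySem.Set.ofList [root] : List Int).length = 1 := rfl
      omega)
  exact h.1

theorem pv_root_mem_reach (graph : List (Int × List Int)) (root : Int) :
    root ∈ pvReach graph root := by
  have h := pv_iter_closed graph root (pvU graph root).length (PySem.Set.ofList [root])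
    (PySem.Set.nodup_ofList _)
    (by intro x hx; simp [PySem.Set.mem_ofList] at hx; subst hx; exact List.mem_cons_self)
    (by
      have h1 := PySem.Set.length_ofList_le (pvU graph root)
      have h2 : (PySem.Set.ofList [root] : List Int).length = 1 := rfl
      omega)
  exact h.2 root (by simp [PySem.Set.mem_ofList])

theorem pv_reach_succ (graph : List (Int × List Int)) (root : Int) (x : Int) (adj : List Int)
    (hx : x ∈ pvReach graph root) (hadj : pvLook graph x = some adj) :
    ∀ y ∈ adj, y ∈ pvReach graph root := by
  intro y hy
  exact pv_reach_closed graph root y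
    ((pv_mem_step graph _ y).mpr (Or.inr ⟨x, hx, adj, hadj, hy⟩))

def pvUnvis (graph : List (Int × List Int)) (root : Int) (vis : PySem.Set Int) : Nat :=
  ((pvReach graph root).filter (fun x => !(PySem.Set.contains vis x))).length

theorem pv_filt_le (p q : Int → Bool) (h : ∀ a, q a = true → p a = true) :
    ∀ l : List Int, (l.filter q).length ≤ (l.filter p).length := by
  intro l
  induction l with
  | nil => simp
  | cons a l ih =>
    by_cases hq : q a = true
    · simp [List.filter_cons, hq, h a hq]; omega
    · simp only [List.filter_cons]
      rw [Bool.not_eq_true] at hq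
      rw [hq]
      cases hp : p a <;> simp <;> omega

theorem pv_filt_lt (p q : Int → Bool) (h : ∀ a, q a = true → p a = true) :
    ∀ (l : List Int) (x : Int), x ∈ l → p x = true → q x = false →
      (l.filter q).length < (l.filter p).length := by
  intro l
  induction l with
  | nil => intro x hx; cases hx
  | cons a l ih =>
    intro x hx hp hq
    rcases List.mem_cons.mp hx with rfl | hx
    · simp only [List.filter_cons, hq, hp]
      have := pv_filt_le p q h l
      simp
      omega
    · have hlt := ih x hx hp hq
      simp only [List.filter_cons]
      cases hqa : q a
      · cases hpa : p a <;> simp <;> omega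
      · rw [h a hqa]; simp; omega

theorem pv_unvis_anti (graph : List (Int × List Int)) (root : Int) (vis vis' : PySem.Set Int)
    (h : ∀ y ∈ vis, y ∈ vis') : pvUnvis graph root vis' ≤ pvUnvis graph root vis := by
  apply pv_filt_le
  intro a ha
  simp only [Bool.not_eq_true'] at ha ⊢
  rw [← Bool.not_eq_true] at ha ⊢
  intro hmem
  exact ha ((PySem.Set.contains_iff _ _).mpr (h a ((PySem.Set.contains_iff _ _).mp hmem)))

theorem pv_unvis_strict (graph : List (Int × List Int)) (root : Int) (vis vis' : PySem.Set Int)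
    (x : Int) (hx : x ∈ pvReach graph root) (hnv : x ∉ vis) (hsub : ∀ y ∈ vis, y ∈ vis')
    (hxv : x ∈ vis') : pvUnvis graph root vis' < pvUnvis graph root vis := by
  apply pv_filt_lt
  · intro a ha
    simp only [Bool.not_eq_true'] at ha ⊢
    rw [← Bool.not_eq_true] at ha ⊢
    intro hmem
    exact ha ((PySem.Set.contains_iff _ _).mpr (hsub a ((PySem.Set.contains_iff _ _).mp hmem)))
  · exact hx
  · simp only [Bool.not_eq_true']
    rw [← Bool.not_eq_true]
    intro hmem
    exact hnv ((PySem.Set.contains_iff _ _).mp hmem)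
  · simp only [Bool.not_eq_false']
    exact (PySem.Set.contains_iff _ _).mpr hxv

theorem pv_suffL (graph : List (Int × List Int)) (root : Int)
    (hkeys : ∀ x ∈ pvReach graph root, (pvLook graph x).isSome = true) (f : Nat)
    (hV : ∀ (current : Int) (bt : PySem.Dict Int (List Int)) (vis : PySem.Set Int),
      current ∈ pvReach graph root →
      2 * pvUnvis graph root vis + (if current ∈ vis then 3 else 2) ≤ f →
      ∃ bt' vis', pvDfsA graph f current (bt, vis) = some (bt', vis') ∧ ∀ y ∈ vis, y ∈ vis') :
    ∀ (sibs : List Int) (prev : Int) (bt : PySem.Dict Int (List Int)) (vis vis₀ : PySem.Set Int),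
      (∀ s ∈ sibs, s ∈ pvReach graph root ∧ s ∉ vis₀) → (∀ y ∈ vis₀, y ∈ vis) →
      2 * pvUnvis graph root vis₀ + 2 ≤ f →
      ∃ bt' vis', pvSibA graph f prev sibs (bt, vis) = some (bt', vis') ∧ ∀ y ∈ vis, y ∈ vis' := by
  intro sibs
  induction sibs with
  | nil =>
    intro prev bt vis vis₀ _ _ _
    exact ⟨bt, vis, by rw [pvSibA], fun y hy => hy⟩
  | cons s ss ih =>
    intro prev bt vis vis₀ hmem hsub hf
    obtain ⟨hsR, hs0⟩ := hmem s List.mem_cons_self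
    have hfuel : 2 * pvUnvis graph root vis + (if s ∈ vis then 3 else 2) ≤ f := by
      by_cases hsv : s ∈ vis
      · have hlt := pv_unvis_strict graph root vis₀ vis s hsR hs0 hsub hsv
        simp only [hsv, if_pos]
        omega
      · have hle := pv_unvis_anti graph root vis₀ vis hsub
        simp only [hsv, if_neg, if_false]
        omega
    obtain ⟨bt1, vis1, hd, hm1⟩ := hV s (pvEmit bt prev s) vis hsR hfuel
    obtain ⟨bt2, vis2, hsb, hm2⟩ := ih s bt1 vis1 vis₀
      (fun x hx => hmem x (List.mem_cons_of_mem _ hx))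
      (fun y hy => hm1 y (hsub y hy)) hf
    refine ⟨bt2, vis2, ?_, fun y hy => hm2 y (hm1 y hy)⟩
    rw [pvSibA, hd]
    exact hsb

theorem pv_suffV (graph : List (Int × List Int)) (root : Int)
    (hkeys : ∀ x ∈ pvReach graph root, (pvLook graph x).isSome = true) :
    ∀ (f : Nat) (current : Int) (bt : PySem.Dict Int (List Int)) (vis : PySem.Set Int),
      current ∈ pvReach graph root →
      2 * pvUnvis graph root vis + (if current ∈ vis then 3 else 2) ≤ f →
      ∃ bt' vis', pvDfsA graph f current (bt, vis) = some (bt', vis') ∧ ∀ y ∈ vis, y ∈ vis' := by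
  intro f
  induction f using Nat.strong_induction_on with
  | _ f ih =>
    match f with
    | 0 =>
      intro current bt vis _ hf
      exfalso
      have : (2:Nat) ≤ if current ∈ vis then 3 else 2 := by split <;> omega
      omega
    | f' + 1 =>
      intro current bt vis hcur hf
      obtain ⟨adj, hadj⟩ := Option.isSome_iff_exists.mp (hkeys current hcur)
      have hmono : ∀ y ∈ vis, y ∈ PySem.Set.add vis current := by
        intro y hy; exact (PySem.Set.mem_add _ _ _).mpr (Or.inl hy)
      cases hch : adj.filter (fun n => !(PySem.Set.contains (PySem.Set.add vis current) n)) with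
      | nil =>
        refine ⟨bt, PySem.Set.add vis current, ?_, hmono⟩
        rw [pvDfsA]
        simp only [hadj, hch]
      | cons c0 cs =>
        have hmemf : ∀ x ∈ c0 :: cs, x ∈ adj ∧ x ∉ PySem.Set.add vis current := by
          intro x hx
          rw [← hch] at hx
          obtain ⟨hxa, hxb⟩ := List.mem_filter.mp hx
          refine ⟨hxa, ?_⟩
          intro hxm
          rw [Bool.not_eq_true', ← Bool.not_eq_true] at hxb
          exact hxb ((PySem.Set.contains_iff _ _).mpr hxm)
        obtain ⟨hc0a, hc0v⟩ := hmemf c0 List.mem_cons_self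
        have hc0R : c0 ∈ pvReach graph root := pv_reach_succ graph root current adj hcur hadj c0 hc0a
        have hchild : 2 * pvUnvis graph root (PySem.Set.add vis current) + 2 ≤ f' := by
          by_cases hcv : current ∈ vis
          · rw [PySem.Set.add_of_mem hcv]
            simp only [hcv, if_pos] at hf
            omega
          · have hlt := pv_unvis_strict graph root vis (PySem.Set.add vis current) current hcur hcv
              hmono ((PySem.Set.mem_add _ _ _).mpr (Or.inr rfl))
            simp only [hcv, if_neg, if_false] at hf
            omega
        have IH : ∀ (n : Int) (bt : PySem.Dict Int (List Int)) (vis : PySem.Set Int),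
            n ∈ pvReach graph root →
            2 * pvUnvis graph root vis + (if n ∈ vis then 3 else 2) ≤ f' →
            ∃ bt' vis', pvDfsA graph f' n (bt, vis) = some (bt', vis') ∧ ∀ y ∈ vis, y ∈ vis' :=
          ih f' (Nat.lt_succ_self f')
        obtain ⟨bt1, vis1, hd, hm1⟩ := IH c0 (pvEmit bt current c0) (PySem.Set.add vis current) hc0R
          (by simp only [hc0v, if_neg, if_false]; exact hchild)
        obtain ⟨bt2, vis2, hsb, hm2⟩ := pv_suffL graph root hkeys f' IH cs c0 bt1 vis1
          (PySem.Set.add vis current)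
          (fun x hx => ⟨pv_reach_succ graph root current adj hcur hadj x (hmemf x (List.mem_cons_of_mem _ hx)).1,
            (hmemf x (List.mem_cons_of_mem _ hx)).2⟩)
          hm1 hchild
        refine ⟨bt2, vis2, ?_, fun y hy => hm2 y (hm1 y (hmono y hy))⟩
        rw [pvDfsA]
        simp only [hadj, hch, hd]
        exact hsb

theorem pv_runB_le (graph : List (Int × List Int)) :
    ∀ (f : Nat) (S : List PvTask) (st out : PySem.Dict Int (List Int) × PySem.Set Int),
      pvRunB graph f S st = some out → ∀ f', f ≤ f' → pvRunB graph f' S st = some out := by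
  intro f S st
  induction f, S, st using pvRunB.induct graph with
  | case1 f st =>
    intro out h f' _
    rw [pvRunB] at h ⊢
    exact h
  | case2 f p c rest bt vis ih =>
    intro out h f' hle
    rw [pvRunB] at h ⊢
    exact ih out h f' hle
  | case3 n rest st =>
    intro out h
    rw [pvRunB] at h
    cases h
  | case4 f node rest bt vis hadj =>
    intro out h
    rw [pvRunB] at h
    simp only [hadj] at h
    cases h
  | case5 f node rest bt vis vis0 adj hadj hfil ih =>
    intro out h f' hle
    have hfil' : List.filter (fun n => !(vis.add node).contains n) adj = [] := hfil
    have ih' : ∀ (out : PySem.Dict Int (List Int) × PySem.Set Int),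
        pvRunB graph f rest (bt, vis.add node) = some out →
        ∀ f', f ≤ f' → pvRunB graph f' rest (bt, vis.add node) = some out := ih
    rw [pvRunB] at h
    simp only [hadj, hfil'] at h
    cases f' with
    | zero => omega
    | succ f'' =>
      rw [pvRunB]
      simp only [hadj, hfil']
      exact ih' out h f'' (Nat.succ_le_succ_iff.mp hle)
  | case6 f node rest bt vis vis0 adj hadj leftmost rest1 hfil ih =>
    intro out h f' hle
    have hfil' : List.filter (fun n => !(vis.add node).contains n) adj = leftmost :: rest1 := hfil
    have ih' : ∀ (out : PySem.Dict Int (List Int) × PySem.Set Int),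
        pvRunB graph f (PvTask.visit leftmost :: (pvChain leftmost rest1 ++ rest)) (pvEmit bt node leftmost, vis.add node) = some out →
        ∀ f', f ≤ f' → pvRunB graph f' (PvTask.visit leftmost :: (pvChain leftmost rest1 ++ rest)) (pvEmit bt node leftmost, vis.add node) = some out := ih
    rw [pvRunB] at h
    simp only [hadj, hfil'] at h
    cases f' with
    | zero => omega
    | succ f'' =>
      rw [pvRunB]
      simp only [hadj, hfil']
      exact ih' out h f'' (Nat.succ_le_succ_iff.mp hle)

theorem pv_adj_len_le (graph : List (Int × List Int)) (x : Int) (adj : List Int)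
    (h : pvLook graph x = some adj) : adj.length + 1 ≤ pvK graph := by
  unfold pvLook PySem.Dict.get? at h
  cases hf : List.find? (fun p => p.1 == x) (PySem.Dict.mk graph).items with
  | none => rw [hf] at h; cases h
  | some p =>
    rw [hf] at h
    simp only [Option.map_some] at h
    have hp : p ∈ graph := List.mem_of_find?_eq_some hf
    have h2 : p.2 = adj := Option.some.inj h
    have hb := (PySem.List.le_foldl_max_nat graph (fun p => p.2.length) 0).2 p hp
    rw [h2] at hb
    unfold pvK
    omega

theorem pv_one_le_pow (a b : Nat) : 1 ≤ (a + 1) ^ b := Nat.one_le_pow _ _ (by omega)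

theorem pv_simL (graph : List (Int × List Int)) (f : Nat)
    (hV : ∀ (n : Int) (st r : PySem.Dict Int (List Int) × PySem.Set Int),
      pvDfsA graph f n st = some r →
      ∀ (g : Nat) (rest : List PvTask) (out : PySem.Dict Int (List Int) × PySem.Set Int),
        pvRunB graph g rest r = some out →
        pvRunB graph (g + (pvK graph + 1) ^ f) (.visit n :: rest) st = some out) :
    ∀ (sibs : List Int) (prev : Int) (st r : PySem.Dict Int (List Int) × PySem.Set Int),
      pvSibA graph f prev sibs st = some r →
      ∀ (g : Nat) (rest : List PvTask) (out : PySem.Dict Int (List Int) × PySem.Set Int),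
        pvRunB graph g rest r = some out →
        pvRunB graph (g + sibs.length * (pvK graph + 1) ^ f) (pvChain prev sibs ++ rest) st = some out := by
  intro sibs
  induction sibs with
  | nil =>
    intro prev st r hs g rest out hrun
    rw [pvSibA] at hs
    cases hs
    simpa using hrun
  | cons s ss ih =>
    intro prev st r hs g rest out hrun
    obtain ⟨bt, vis⟩ := st
    rw [pvSibA] at hs
    cases hd : pvDfsA graph f s (pvEmit bt prev s, vis) with
    | none => rw [hd] at hs; cases hs
    | some st1 =>
      rw [hd] at hs
      have h1 := ih s st1 r hs g rest out hrun
      have h2 := hV s (pvEmit bt prev s, vis) st1 hd (g + ss.length * (pvK graph + 1) ^ f)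
        (pvChain s ss ++ rest) out h1
      have hch : pvChain prev (s :: ss) ++ rest =
          PvTask.edge prev s :: PvTask.visit s :: (pvChain s ss ++ rest) := by
        rw [pvChain]; simp
      rw [hch]
      have hstep : pvRunB graph (g + ss.length * (pvK graph + 1) ^ f + (pvK graph + 1) ^ f)
          (PvTask.edge prev s :: PvTask.visit s :: (pvChain s ss ++ rest)) (bt, vis) =
          pvRunB graph (g + ss.length * (pvK graph + 1) ^ f + (pvK graph + 1) ^ f)
          (PvTask.visit s :: (pvChain s ss ++ rest)) (pvEmit bt prev s, vis) := by
        rw [pvRunB]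
      have : g + (s :: ss).length * (pvK graph + 1) ^ f =
          g + ss.length * (pvK graph + 1) ^ f + (pvK graph + 1) ^ f := by
        simp [List.length_cons]; ring
      rw [this, hstep]
      exact h2

theorem pv_simV (graph : List (Int × List Int)) :
    ∀ (f : Nat) (n : Int) (st r : PySem.Dict Int (List Int) × PySem.Set Int),
      pvDfsA graph f n st = some r →
      ∀ (g : Nat) (rest : List PvTask) (out : PySem.Dict Int (List Int) × PySem.Set Int),
        pvRunB graph g rest r = some out →
        pvRunB graph (g + (pvK graph + 1) ^ f) (.visit n :: rest) st = some out := by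
  intro f
  induction f using Nat.strong_induction_on with
  | _ f ihf =>
    match f with
    | 0 =>
      intro n st r hd
      rw [pvDfsA] at hd
      cases hd
    | f' + 1 =>
      intro n st r hd g rest out hrun
      obtain ⟨bt, vis⟩ := st
      rw [pvDfsA] at hd
      cases hadj : pvLook graph n with
      | none => rw [hadj] at hd; cases hd
      | some adj =>
        rw [hadj] at hd
        simp only at hd
        have hIH := ihf f' (Nat.lt_succ_self f')
        cases hch : adj.filter (fun m => !(PySem.Set.contains (PySem.Set.add vis n) m)) with
        | nil =>
          rw [hch] at hd
          simp only at hd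
          cases hd
          -- r = (bt, vis.add n); one visit step then mono
          have hpow := pv_one_le_pow (pvK graph) (f' + 1)
          obtain ⟨m, hm⟩ : ∃ m, g + (pvK graph + 1) ^ (f' + 1) = m + 1 :=
            ⟨g + (pvK graph + 1) ^ (f' + 1) - 1, by omega⟩
          rw [hm, pvRunB]
          simp only [hadj, hch]
          exact pv_runB_le graph g rest _ out hrun m (by omega)
        | cons c0 cs =>
          rw [hch] at hd
          simp only at hd
          cases hd0 : pvDfsA graph f' c0 (pvEmit bt n c0, PySem.Set.add vis n) with
          | none => rw [hd0] at hd; cases hd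
          | some st1 =>
            rw [hd0] at hd
            have h1 := pv_simL graph f' hIH cs c0 st1 r hd g rest out hrun
            have h2 := hIH c0 (pvEmit bt n c0, PySem.Set.add vis n) st1 hd0
              (g + cs.length * (pvK graph + 1) ^ f') (pvChain c0 cs ++ rest) out h1
            -- one visit step from fuel X+1, then mono up to g + (K+1)^(f'+1)
            have hlenK : cs.length + 2 ≤ pvK graph + 1 := by
              have hfl : (c0 :: cs).length ≤ adj.length := by
                rw [← hch]; exact List.length_filter_le _ _
              have := pv_adj_len_le graph n adj hadj
              simp at hfl
              omega
            have hpow : (1:Nat) ≤ (pvK graph + 1) ^ f' := pv_one_le_pow _ _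
            have hle : g + cs.length * (pvK graph + 1) ^ f' + (pvK graph + 1) ^ f' + 1 ≤
                g + (pvK graph + 1) ^ (f' + 1) := by
              have : (cs.length + 1) * (pvK graph + 1) ^ f' + 1 ≤
                  (pvK graph + 1) * (pvK graph + 1) ^ f' := by
                have h3 : (cs.length + 2) * (pvK graph + 1) ^ f' ≤
                    (pvK graph + 1) * (pvK graph + 1) ^ f' :=
                  Nat.mul_le_mul_right _ (by omega)
                nlinarith
              rw [pow_succ]
              nlinarith
            have hstep : pvRunB graph (g + cs.length * (pvK graph + 1) ^ f' + (pvK graph + 1) ^ f' + 1)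
                (PvTask.visit n :: rest) (bt, vis) = some out := by
              rw [pvRunB]
              simp only [hadj, hch]
              exact h2
            exact pv_runB_le graph _ _ _ _ hstep _ hle

-- ===== VERDICT (by name: the statement is the Claim_ definition above) =====
theorem convert_to_binary_tree_spec : Claim_equal_convert_to_binary_tree := by
  intro graph root _ hpre
  unfold Spec_convert_to_binary_tree
  have hfuel : 2 * pvUnvis graph root PySem.Set.empty +
      (if root ∈ (PySem.Set.empty : PySem.Set Int) then 3 else 2) ≤ pvFuelA graph root := by
    have h1 : pvUnvis graph root PySem.Set.empty ≤ (pvReach graph root).length :=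
      List.length_filter_le _ _
    have h2 : (if root ∈ (PySem.Set.empty : PySem.Set Int) then 3 else 2) = 2 := by
      rw [if_neg]
      intro h
      exact List.not_mem_nil h
    rw [h2]
    unfold pvFuelA
    omega
  obtain ⟨bt', vis', hA, -⟩ :=
    pv_suffV graph root hpre (pvFuelA graph root) root (PySem.Dict.mk []) PySem.Set.empty
      (pv_root_mem_reach graph root) hfuel
  have hB := pv_simV graph (pvFuelA graph root) root (PySem.Dict.mk [], PySem.Set.empty)
      (bt', vis') hA 0 [] (bt', vis') (by rw [pvRunB])
  unfold convert_to_binary_tree convert_to_binary_tree_alt pvFuelB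
  rw [hA]
  rw [Nat.zero_add] at hB
  rw [hB]
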